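-- pv_equiv track=rewrite | github.com/1ncompleteness/Pizza-Slice-Instant-Insanity | pizza_insanity.py | solve
-- ===== SOURCE A (Python) =====
-- def rotations(t):
--     return [(t[0],t[1],t[2]), (t[1],t[2],t[0]), (t[2],t[0],t[1])]
--
-- def solve(slices):
--     n = len(slices)
--
--     def bt(idx, used, cols):
--         if idx == n:
--             return []
--         for r in rotations(slices[idx]):
--             ok = all(r[j] not in cols[j] for j in range(3))
--             if ok:
--                 for j in range(3):
--                     cols[j].add(r[j])
--                 rest = bt(idx+1, used|{idx}, cols)
--                 if rest is not None:
--                     return [(idx, r)] + rest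
--                 for j in range(3):
--                     cols[j].remove(r[j])
--         return None
--
--     return bt(0, set(), [set(), set(), set()])
-- ===== SOURCE B (Python) =====
-- def rotations(t):
--     return [(t[0],t[1],t[2]), (t[1],t[2],t[0]), (t[2],t[0],t[1])]
--
-- def valid(chosen):
--     return all(len({r[j] for r in chosen}) == len(chosen) for j in range(3))
--
-- def solve(slices):
--     n = len(slices)
--     pools = [rotations(s) for s in slices]
--     stack = []          # stack[i] = which rotation of slice i is currently chosen
--     while True:
--         chosen = [p[c] for p, c in zip(pools, stack)]
--         if valid(chosen):
--             if len(stack) == n: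
--                 return list(enumerate(chosen))
--             stack.append(0)
--         else:
--             while stack and stack[-1] == 2:
--                 stack.pop()
--             if not stack:
--                 return None
--             stack[-1] += 1
-- ===== Notes on version B (the rewrite author's own statement) =====
-- stated objective: alternative
-- what changed: Replaced A's recursive backtracking with mutable column sets and undo by an iterative explicit-stack odometer loop that re-derives the chosen prefix from the stack of rotation indices and re-checks column distinctness from scratch with a set-length test at every step.
import Mathlib
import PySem

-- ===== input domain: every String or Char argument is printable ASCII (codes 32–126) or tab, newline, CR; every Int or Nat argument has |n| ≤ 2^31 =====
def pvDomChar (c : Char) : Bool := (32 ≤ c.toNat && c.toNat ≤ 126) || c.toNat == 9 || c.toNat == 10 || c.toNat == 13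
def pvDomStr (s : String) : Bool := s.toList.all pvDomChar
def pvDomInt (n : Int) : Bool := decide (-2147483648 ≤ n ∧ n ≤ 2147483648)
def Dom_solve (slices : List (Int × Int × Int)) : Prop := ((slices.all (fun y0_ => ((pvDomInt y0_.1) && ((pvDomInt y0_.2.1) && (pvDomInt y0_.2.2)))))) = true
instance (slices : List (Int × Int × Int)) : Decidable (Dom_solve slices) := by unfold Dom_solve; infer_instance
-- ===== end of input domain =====

-- B replaces A's recursive backtracking over mutable column sets with an iterative
-- explicit-stack odometer loop that re-checks the chosen prefix from scratch each step
-- (objective: alternative — same pruned search order, different structure).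

-- ===== PORT A =====
-- shared helper: Python's rotations(t)
def rotations (t : Int × Int × Int) : List (Int × Int × Int) :=
  [(t.1, t.2.1, t.2.2), (t.2.1, t.2.2, t.1), (t.2.2, t.1, t.2.1)]

-- Python's inner bt: recursion on the remaining slices (idx carried for the output pairs);
-- the for-loop with early return is findSome?; the mutate/undo of cols becomes passing the
-- extended column sets only into the recursive call.
def bt : List (Int × Int × Int) → Int → PySem.Set Int →
    PySem.Set Int × PySem.Set Int × PySem.Set Int → Option (List (Int × (Int × Int × Int)))
  | [], _, _, _ => some []
  | s :: rest, idx, used, (c1, c2, c3) =>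
      (rotations s).findSome? (fun r =>
        if !(c1.contains r.1) && !(c2.contains r.2.1) && !(c3.contains r.2.2) then
          match bt rest (idx + 1) (used.add idx) (c1.add r.1, c2.add r.2.1, c3.add r.2.2) with
          | some restAns => some ((idx, r) :: restAns)
          | none => none
        else none)

def solve (slices : List (Int × Int × Int)) : Option (List (Int × (Int × Int × Int))) :=
  bt slices 0 PySem.Set.empty (PySem.Set.empty, PySem.Set.empty, PySem.Set.empty)

-- ===== PORT B =====
-- len({r[j] for r in chosen}) == len(chosen) for one column j (proj = r ↦ r[j])
def colDistinct (chosen : List (Int × Int × Int)) (proj : (Int × Int × Int) → Int) : Bool :=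
  PySem.Set.len (PySem.Set.ofList (chosen.map proj)) == (chosen.length : Int)

-- Source B's valid(chosen): all(... for j in range(3))
def validB (chosen : List (Int × Int × Int)) : Bool :=
  colDistinct chosen (·.1) && colDistinct chosen (·.2.1) && colDistinct chosen (·.2.2)

-- [p[c] for p, c in zip(pools, stack)]
def chosenB (pools : List (List (Int × Int × Int))) (stack : List Int) : List (Int × Int × Int) :=
  (pools.zip stack).map (fun pc => PySem.List.pyGetD pc.1 pc.2 (0, 0, 0))

-- while stack and stack[-1] == 2: stack.pop()
def drop2 (stack : List Int) : List Int := (stack.reverse.dropWhile (fun c => c == 2)).reverse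

-- stack[-1] += 1
def incLast (stack : List Int) : List Int :=
  match stack.reverse with
  | [] => []
  | c :: rt => ((c + 1) :: rt).reverse

-- totality fuel for the while-True loop: fuelB d = number of stack states over d levels
def fuelB : Nat → Nat
  | 0 => 1
  | d + 1 => 1 + 3 * fuelB d

-- Source B's while-True loop (fuel only makes the port total; it never runs out, see loopB_char)
def loopB (pools : List (List (Int × Int × Int))) (n : Int) :
    Nat → List Int → Option (List (Int × (Int × Int × Int)))
  | 0, _ => none
  | fuel + 1, stack =>
    let chosen := chosenB pools stack
    if validB chosen then
      if (stack.length : Int) == n then some (PySem.List.enumerate chosen)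
      else loopB pools n fuel (stack ++ [0])
    else
      let s' := drop2 stack
      if s'.isEmpty then none
      else loopB pools n fuel (incLast s')

def solve_alt (slices : List (Int × Int × Int)) : Option (List (Int × (Int × Int × Int))) :=
  loopB (slices.map rotations) (slices.length : Int) (fuelB slices.length + 1) []

-- ===== PRECONDITION & SPEC =====
def Spec_solve (slices : List (Int × Int × Int)) (out : Option (List (Int × (Int × Int × Int)))) : Prop := out = solve_alt slices
instance (slices : List (Int × Int × Int)) (out : Option (List (Int × (Int × Int × Int)))) : Decidable (Spec_solve slices out) := by unfold Spec_solve; infer_instance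

-- ===== CLAIM (what is proved, stated in full; the proofs are below) =====
def Claim_equal_solve : Prop := ∀ (slices : List (Int × Int × Int)), Dom_solve slices → Spec_solve slices (solve slices)

-- ===== LEMMAS AND PROOFS =====

-- all full combinations (one rotation per pool), first pool varying slowest
def combosB : List (List (Int × Int × Int)) → List (List (Int × Int × Int))
  | [] => [[]]
  | p :: ps => p.flatMap (fun r => (combosB ps).map (fun tail => r :: tail))

-- "extending the given column sets by this suffix keeps all three columns conflict-free"
def extOk : PySem.Set Int × PySem.Set Int × PySem.Set Int → List (Int × Int × Int) → Bool
  | _, [] => true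
  | (c1, c2, c3), r :: combo =>
      (!(c1.contains r.1) && !(c2.contains r.2.1) && !(c3.contains r.2.2)) &&
      extOk (c1.add r.1, c2.add r.2.1, c3.add r.2.2) combo

-- one-column version of extOk
def colOk : PySem.Set Int → List Int → Bool
  | _, [] => true
  | c, x :: l => !(c.contains x) && colOk (c.add x) l

theorem extOk_false_head (c1 c2 c3 : PySem.Set Int) (r : Int × Int × Int)
    (combo : List (Int × Int × Int))
    (h : (!(c1.contains r.1) && !(c2.contains r.2.1) && !(c3.contains r.2.2)) = false) :
    extOk (c1, c2, c3) (r :: combo) = false := by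
  simp only [extOk, h, Bool.false_and]

theorem extOk_true_head (c1 c2 c3 : PySem.Set Int) (r : Int × Int × Int)
    (combo : List (Int × Int × Int))
    (h : (!(c1.contains r.1) && !(c2.contains r.2.1) && !(c3.contains r.2.2)) = true) :
    extOk (c1, c2, c3) (r :: combo)
      = extOk (c1.add r.1, c2.add r.2.1, c3.add r.2.2) combo := by
  simp only [extOk, h, Bool.true_and]

-- the inner for-loop of bt, characterised (ih = characterisation for the remaining slices)
theorem btLoop_char (rest : List (Int × Int × Int))
    (ih : ∀ (idx : Int) (used : PySem.Set Int) (c : PySem.Set Int × PySem.Set Int × PySem.Set Int),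
      bt rest idx used c
        = ((combosB (rest.map rotations)).find? (extOk c)).map
            (fun combo => PySem.List.enumerate combo idx)) :
    ∀ (rs : List (Int × Int × Int)) (idx : Int) (used : PySem.Set Int)
      (c1 c2 c3 : PySem.Set Int),
      (rs.findSome? (fun r =>
        if !(c1.contains r.1) && !(c2.contains r.2.1) && !(c3.contains r.2.2) then
          match bt rest (idx + 1) (used.add idx) (c1.add r.1, c2.add r.2.1, c3.add r.2.2) with
          | some restAns => some ((idx, r) :: restAns)
          | none => none
        else none))
      = ((rs.flatMap (fun r => (combosB (rest.map rotations)).map (fun tail => r :: tail))).find?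
            (extOk (c1, c2, c3))).map
          (fun combo => PySem.List.enumerate combo idx) := by
  intro rs
  induction rs with
  | nil => intro idx used c1 c2 c3; rfl
  | cons r rs' ihrs =>
    intro idx used c1 c2 c3
    rw [List.findSome?_cons, List.flatMap_cons, List.find?_append, List.find?_map]
    by_cases hok : (!(c1.contains r.1) && !(c2.contains r.2.1) && !(c3.contains r.2.2)) = true
    · have hfun : (extOk (c1, c2, c3) ∘ fun tail => r :: tail)
          = extOk (c1.add r.1, c2.add r.2.1, c3.add r.2.2) :=
        funext fun combo => extOk_true_head c1 c2 c3 r combo hok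
      rw [hfun, ih (idx + 1) (used.add idx)]
      cases hfind : (combosB (rest.map rotations)).find?
          (extOk (c1.add r.1, c2.add r.2.1, c3.add r.2.2)) with
      | some combo =>
        have hok2 : (r.1 ∉ c1 ∧ r.2.1 ∉ c2) ∧ r.2.2 ∉ c3 := by
          simpa [PySem.Set.contains] using hok
        simp [hok2, PySem.List.enumerate_cons]
      | none =>
        simp only [Option.map_none, Option.none_or, hok, if_true]
        exact ihrs idx used c1 c2 c3
    · have hok' : (!(c1.contains r.1) && !(c2.contains r.2.1) && !(c3.contains r.2.2)) = false :=
        by simpa using hok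
      have hnone : ((combosB (rest.map rotations)).find?
          (extOk (c1, c2, c3) ∘ fun tail => r :: tail)) = none := by
        rw [List.find?_eq_none]
        intro tail _
        simp [Function.comp, extOk_false_head c1 c2 c3 r tail hok']
      rw [hnone]
      simp only [Option.map_none, Option.none_or, hok', Bool.false_eq_true, if_false]
      exact ihrs idx used c1 c2 c3

-- bt = first valid suffix combination (in product order), decorated with indices
theorem bt_char (rest : List (Int × Int × Int)) :
    ∀ (idx : Int) (used : PySem.Set Int) (c : PySem.Set Int × PySem.Set Int × PySem.Set Int),
      bt rest idx used c
        = ((combosB (rest.map rotations)).find? (extOk c)).map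
            (fun combo => PySem.List.enumerate combo idx) := by
  induction rest with
  | nil =>
    intro idx used c
    simp [bt, combosB, extOk, PySem.List.enumerate]
  | cons s rest ih =>
    intro idx used c
    obtain ⟨c1, c2, c3⟩ := c
    rw [show (s :: rest).map rotations = rotations s :: rest.map rotations from rfl]
    exact btLoop_char rest ih (rotations s) idx used c1 c2 c3

-- extOk splits into three independent columns
theorem extOk_eq_colOk (combo : List (Int × Int × Int)) :
    ∀ (c1 c2 c3 : PySem.Set Int),
      extOk (c1, c2, c3) combo
        = (colOk c1 (combo.map (·.1)) && colOk c2 (combo.map (·.2.1))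
            && colOk c3 (combo.map (·.2.2))) := by
  induction combo with
  | nil => intro c1 c2 c3; rfl
  | cons r combo ih =>
    intro c1 c2 c3
    simp only [extOk, List.map_cons, colOk, ih]
    cases c1.contains r.1 <;> cases c2.contains r.2.1 <;> cases c3.contains r.2.2 <;> simp

theorem mem_set_iff (s : PySem.Set Int) (x : Int) : s.contains x = true ↔ x ∈ s := by
  simp [PySem.Set.contains]

theorem colOk_iff (l : List Int) :
    ∀ (c : PySem.Set Int), colOk c l = true ↔ (∀ x ∈ l, x ∉ c) ∧ l.Nodup := by
  induction l with
  | nil => intro c; simp [colOk]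
  | cons x l ih =>
    intro c
    simp only [colOk, Bool.and_eq_true, Bool.not_eq_true', ih, List.nodup_cons]
    constructor
    · rintro ⟨hx, hall, hnd⟩
      have hx' : x ∉ c := fun h => by
        rw [(mem_set_iff c x).mpr h] at hx; exact Bool.true_eq_false.mp hx
      refine ⟨?_, ?_, hnd⟩
      · intro y hy
        rcases List.mem_cons.mp hy with rfl | hy'
        · exact hx'
        · intro hyc
          exact (hall y hy') ((PySem.Set.mem_add c x y).mpr (Or.inl hyc))
      · intro hxl
        exact (hall x hxl) ((PySem.Set.mem_add c x x).mpr (Or.inr rfl))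
    · rintro ⟨hall, hxl, hnd⟩
      refine ⟨?_, ?_, hnd⟩
      · have hx' : x ∉ c := hall x (List.mem_cons_self ..)
        rw [← Bool.not_eq_true]
        intro hcx
        exact hx' ((mem_set_iff c x).mp hcx)
      · intro y hy hyc
        rcases (PySem.Set.mem_add c x y).mp hyc with h | rfl
        · exact hall y (List.mem_cons_of_mem _ hy) h
        · exact hxl hy

theorem len_ofList_eq_iff (l : List Int) :
    (PySem.Set.ofList l).length = l.length ↔ l.Nodup := by
  induction l with
  | nil => simp
  | cons x l ih =>
    rw [PySem.Set.ofList_cons]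
    simp only [List.length_cons, Nat.add_right_cancel_iff, List.nodup_cons]
    constructor
    · intro h
      have h1 : ((PySem.Set.ofList l).discard x).length ≤ (PySem.Set.ofList l).length := by
        simp only [PySem.Set.discard]
        exact List.length_filter_le _ _
      have h2 := PySem.Set.length_ofList_le l
      have h3 : (PySem.Set.ofList l).length = l.length := by omega
      have hnd := ih.mp h3
      have hself := PySem.Set.ofList_eq_self_of_nodup l hnd
      rw [hself] at h
      simp only [PySem.Set.discard] at h
      have hall := List.length_filter_eq_length_iff.mp h
      refine ⟨fun hxl => ?_, hnd⟩
      have := hall x hxl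
      simp at this
    · rintro ⟨hxl, hnd⟩
      have hself := PySem.Set.ofList_eq_self_of_nodup l hnd
      rw [hself]
      simp only [PySem.Set.discard]
      rw [List.filter_eq_self.mpr]
      intro y hy
      simp only [Bool.not_eq_eq_eq_not, Bool.not_true, beq_eq_false_iff_ne, ne_eq]
      intro h
      exact hxl (h ▸ hy)

theorem colDistinct_iff (combo : List (Int × Int × Int)) (proj : (Int × Int × Int) → Int) :
    colDistinct combo proj = true ↔ (combo.map proj).Nodup := by
  unfold colDistinct
  rw [← len_ofList_eq_iff]
  simp [PySem.Set.len, List.length_map]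

theorem colOk_empty (l : List Int) :
    colOk PySem.Set.empty l = true ↔ l.Nodup := by
  rw [colOk_iff]
  simp [PySem.Set.empty]

theorem validB_eq_extOk :
    validB = extOk (PySem.Set.empty, PySem.Set.empty, PySem.Set.empty) := by
  funext combo
  rw [extOk_eq_colOk]
  rw [Bool.eq_iff_iff]
  simp only [Bool.and_eq_true, validB]
  rw [colOk_empty, colOk_empty, colOk_empty, colDistinct_iff, colDistinct_iff, colDistinct_iff]

-- ===== the tree-traversal reading of B's loop =====

-- full combinations below the prefix encoded by `stack`, in search order
def subC (pools : List (List (Int × Int × Int))) (s : List Int) : List (List (Int × Int × Int)) :=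
  (combosB (pools.drop s.length)).map (fun t => chosenB pools s ++ t)

-- full combinations strictly after the subtree of the stack (argument REVERSED)
def afterR (pools : List (List (Int × Int × Int))) : List Int → List (List (Int × Int × Int))
  | [] => []
  | c :: rt =>
      (if c < 1 then subC pools (rt.reverse ++ [1]) else []) ++
        ((if c < 2 then subC pools (rt.reverse ++ [2]) else []) ++ afterR pools rt)

-- full combinations not yet ruled out when the loop is at state `s`
def remC (pools : List (List (Int × Int × Int))) (s : List Int) : List (List (Int × Int × Int)) :=
  subC pools s ++ afterR pools s.reverse

def wfS (pools : List (List (Int × Int × Int))) (s : List Int) : Prop :=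
  s.length ≤ pools.length ∧ ∀ c ∈ s, c = 0 ∨ c = 1 ∨ c = 2

-- weight of the already-made choices (d = depth budget)
def SS : Nat → List Int → Nat
  | _, [] => 0
  | d, c :: cs => (2 - c.toNat) * fuelB (d - 1) + SS (d - 1) cs

-- loop measure: states still to be visited from `s`
def muS (n : Nat) (s : List Int) : Nat := SS n s + fuelB (n - s.length)

theorem fuelB_pos (d : Nat) : 1 ≤ fuelB d := by
  cases d <;> simp [fuelB]

theorem SS_append (s : List Int) : ∀ (r : List Int) (d : Nat),
    SS d (s ++ r) = SS d s + SS (d - s.length) r := by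
  induction s with
  | nil => intro r d; simp [SS]
  | cons c s ih =>
    intro r d
    simp only [List.cons_append, SS, List.length_cons]
    rw [ih r (d - 1), show d - 1 - s.length = d - (s.length + 1) from by omega]
    omega

theorem SS_twos (r : List Int) (h : ∀ c ∈ r, c = 2) : ∀ d, SS d r = 0 := by
  induction r with
  | nil => intro d; rfl
  | cons c rt ih =>
    intro d
    have hc : c = 2 := h c (List.mem_cons_self ..)
    simp only [SS, hc]
    rw [ih (fun x hx => h x (List.mem_cons_of_mem _ hx)) (d - 1)]
    norm_num

theorem chosenB_cons (p : List (Int × Int × Int)) (ps : List (List (Int × Int × Int)))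
    (a : Int) (cs : List Int) :
    chosenB (p :: ps) (a :: cs) = PySem.List.pyGetD p a (0, 0, 0) :: chosenB ps cs := rfl

theorem chosen_snoc (s : List Int) : ∀ (pools : List (List (Int × Int × Int))) (c : Int),
    s.length < pools.length →
    chosenB pools (s ++ [c])
      = chosenB pools s ++ [PySem.List.pyGetD (pools.getD s.length []) c (0, 0, 0)] := by
  induction s with
  | nil =>
    intro pools c h
    cases pools with
    | nil => simp at h
    | cons p ps => simp [chosenB]
  | cons a s ih =>
    intro pools c h
    cases pools with
    | nil => simp at h
    | cons p ps =>
      simp only [List.cons_append, chosenB_cons, ih ps c (by simpa using h),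
        List.length_cons, List.getD_cons_succ]

theorem valid_prefix (pre t : List (Int × Int × Int)) (h : validB (pre ++ t) = true) :
    validB pre = true := by
  simp only [validB, Bool.and_eq_true, colDistinct_iff, List.map_append] at h ⊢
  exact ⟨⟨(List.nodup_append.mp h.1.1).1, (List.nodup_append.mp h.1.2).1⟩,
    (List.nodup_append.mp h.2).1⟩

theorem subC_full (pools : List (List (Int × Int × Int))) (s : List Int)
    (h : s.length = pools.length) : subC pools s = [chosenB pools s] := by
  simp [subC, h, List.drop_length, combosB]

theorem invalid_sub (pools : List (List (Int × Int × Int))) (s : List Int)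
    (h : validB (chosenB pools s) = false) : (subC pools s).find? validB = none := by
  rw [List.find?_eq_none]
  intro x hx
  rcases List.mem_map.mp hx with ⟨t, _, rfl⟩
  intro hv
  rw [valid_prefix _ _ hv] at h
  exact Bool.true_eq_false.mp h

theorem pyGetD_cons3 (x y z : Int × Int × Int) :
    PySem.List.pyGetD [x, y, z] (0 : Int) (0, 0, 0) = x ∧
    PySem.List.pyGetD [x, y, z] (1 : Int) (0, 0, 0) = y ∧
    PySem.List.pyGetD [x, y, z] (2 : Int) (0, 0, 0) = z := by
  refine ⟨?_, ?_, ?_⟩ <;> simp [PySem.List.pyGetD, PySem.List.pyGet?, PySem.List.pyIdx?]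

theorem subC_split (pools : List (List (Int × Int × Int)))
    (hp : ∀ p ∈ pools, p.length = 3) (s : List Int) (h : s.length < pools.length) :
    subC pools s = subC pools (s ++ [0]) ++ (subC pools (s ++ [1]) ++ subC pools (s ++ [2])) := by
  have hd : pools.drop s.length = pools[s.length] :: pools.drop (s.length + 1) :=
    List.drop_eq_getElem_cons h
  have hg : pools.getD s.length [] = pools[s.length] := List.getD_eq_getElem _ _ h
  have hp3 : pools[s.length].length = 3 := hp _ (List.getElem_mem h)
  rcases List.length_eq_three.mp hp3 with ⟨x, y, z, hxyz⟩
  obtain ⟨g0, g1, g2⟩ := pyGetD_cons3 x y z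
  have hsub : ∀ (c : Int) (v : Int × Int × Int),
      PySem.List.pyGetD (pools.getD s.length []) c (0, 0, 0) = v →
      subC pools (s ++ [c])
        = (combosB (pools.drop (s.length + 1))).map (fun t => chosenB pools s ++ (v :: t)) := by
    intro c v hv
    simp only [subC, List.length_append, List.length_cons, List.length_nil,
      chosen_snoc s pools c h, hv]
    apply List.map_congr_left
    intro t _
    simp
  rw [hsub 0 x (by rw [hg, hxyz]; exact g0), hsub 1 y (by rw [hg, hxyz]; exact g1),
    hsub 2 z (by rw [hg, hxyz]; exact g2)]
  simp only [subC, hd, hxyz, combosB, List.flatMap_cons, List.flatMap_nil, List.map_append,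
    List.map_map, List.append_nil]
  rfl

theorem afterR_two (pools : List (List (Int × Int × Int))) (rt : List Int) :
    afterR pools ((2 : Int) :: rt) = afterR pools rt := by
  simp [afterR]

theorem afterR_dropWhile (pools : List (List (Int × Int × Int))) (rs : List Int)
    (h : ∀ c ∈ rs, c = 0 ∨ c = 1 ∨ c = 2) :
    afterR pools (rs.dropWhile (fun c => c == 2)) = afterR pools rs := by
  induction rs with
  | nil => rfl
  | cons c rt ih =>
    by_cases hc : c = 2
    · subst hc
      rw [List.dropWhile_cons_of_pos (by simp), afterR_two]
      exact ih (fun x hx => h x (List.mem_cons_of_mem _ hx))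
    · rw [List.dropWhile_cons_of_neg (by simpa using hc)]

theorem dropWhile_head_false {α : Type} (p : α → Bool) (l : List α) :
    ∀ (c : α) (rt : List α), l.dropWhile p = c :: rt → p c = false := by
  induction l with
  | nil => intro c rt h; simp at h
  | cons a l ih =>
    intro c rt h
    by_cases ha : p a = true
    · rw [List.dropWhile_cons_of_pos ha] at h
      exact ih c rt h
    · rw [List.dropWhile_cons_of_neg ha] at h
      cases h
      simpa using ha

-- the two search-order identities
theorem rem_append0 (pools : List (List (Int × Int × Int)))
    (hp : ∀ p ∈ pools, p.length = 3) (s : List Int) (h : s.length < pools.length) :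
    remC pools (s ++ [0]) = remC pools s := by
  have hrev : (s ++ [(0 : Int)]).reverse = (0 : Int) :: s.reverse := by simp
  simp only [remC, hrev, afterR, List.reverse_reverse]
  rw [subC_split pools hp s h]
  simp

theorem after_advance (pools : List (List (Int × Int × Int))) (rt : List Int) (c : Int)
    (hc : c = 0 ∨ c = 1) :
    afterR pools (c :: rt) = remC pools (rt.reverse ++ [c + 1]) := by
  have hrev : (rt.reverse ++ [c + 1]).reverse = (c + 1) :: rt := by simp
  simp only [remC, hrev]
  rcases hc with rfl | rfl
  · simp [afterR]
  · simp [afterR]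

-- measure bookkeeping
theorem mu_append0 (n : Nat) (s : List Int) (h : s.length < n) :
    muS n (s ++ [0]) + 1 = muS n s := by
  simp only [muS, SS_append, List.length_append, List.length_cons, List.length_nil, SS]
  have hk : n - s.length = (n - s.length - 1) + 1 := by omega
  have : fuelB (n - s.length) = 1 + 3 * fuelB (n - s.length - 1) := by
    rw [hk]; rfl
  have h2 : n - (s.length + 1) = n - s.length - 1 := by omega
  simp only [Int.toNat_zero, Nat.sub_zero, h2]
  omega

theorem mu_advance (n : Nat) (v : List Int) (c : Int) (m2 : List Int)
    (h2 : ∀ x ∈ m2, x = 2) (hc : c = 0 ∨ c = 1) :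
    muS n (v ++ [c + 1]) < muS n ((v ++ [c]) ++ m2) := by
  have hs2 : SS (n - (v.length + 1)) m2 = 0 := SS_twos m2 h2 _
  simp only [muS, SS_append, List.length_append, List.length_cons, List.length_nil, SS, hs2]
  rw [show n - (v.length + 1) = n - v.length - 1 from by omega]
  have hb := fuelB_pos (n - (v.length + 1 + m2.length))
  rcases hc with rfl | rfl <;> norm_num <;> omega

-- wf bookkeeping for the advance step
theorem wf_entries_drop (s : List Int) (c : Int) (rt : List Int)
    (hw : ∀ x ∈ s, x = 0 ∨ x = 1 ∨ x = 2)
    (hd : s.reverse.dropWhile (fun c => c == 2) = c :: rt) :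
    (∀ x ∈ rt, x = 0 ∨ x = 1 ∨ x = 2) ∧ (c = 0 ∨ c = 1) ∧ rt.length + 1 ≤ s.length := by
  have hsub : (c :: rt).Sublist s.reverse := hd ▸ List.dropWhile_sublist _
  have hmem : ∀ x ∈ c :: rt, x ∈ s := fun x hx =>
    List.mem_reverse.mp (hsub.mem hx)
  have hcne : c ≠ 2 := by
    have := dropWhile_head_false (fun c => c == 2) s.reverse c rt hd
    simpa using this
  have hcs := hw c (hmem c (List.mem_cons_self ..))
  refine ⟨fun x hx => hw x (hmem x (List.mem_cons_of_mem _ hx)), by tauto, ?_⟩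
  have := hsub.length_le
  simpa using this

-- the loop computes the first valid combination among those not yet ruled out
theorem loopB_char (pools : List (List (Int × Int × Int)))
    (hp : ∀ p ∈ pools, p.length = 3) :
    ∀ (fuel : Nat) (s : List Int), wfS pools s → muS pools.length s < fuel →
      loopB pools (pools.length : Int) fuel s
        = ((remC pools s).find? validB).map (fun combo => PySem.List.enumerate combo) := by
  intro fuel
  induction fuel with
  | zero => intro s _ h; exact absurd h (Nat.not_lt_zero _)
  | succ fuel ih =>
    intro s hwf hmu
    simp only [loopB]
    by_cases hv : validB (chosenB pools s) = true
    · rw [if_pos hv]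
      by_cases hn : s.length = pools.length
      · have hbeq : ((s.length : Int) == (pools.length : Int)) = true := by simp [hn]
        simp only [hbeq, if_true]
        rw [remC, subC_full pools s hn, List.cons_append, List.find?_cons_of_pos hv]
        rfl
      · have hlt : s.length < pools.length := lt_of_le_of_ne hwf.1 hn
        have hbeq : ((s.length : Int) == (pools.length : Int)) = false := by
          simpa using hn
        simp only [hbeq, Bool.false_eq_true, if_false]
        have hwf' : wfS pools (s ++ [0]) := by
          refine ⟨by simpa using hlt, fun c hc => ?_⟩
          rcases List.mem_append.mp hc with h | h
          · exact hwf.2 c h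
          · left; simpa using h
        have hmu' : muS pools.length (s ++ [0]) < fuel := by
          have := mu_append0 pools.length s hlt
          omega
        rw [ih (s ++ [0]) hwf' hmu', rem_append0 pools hp s hlt]
    · rw [if_neg hv]
      have hvfalse : validB (chosenB pools s) = false := by simpa using hv
      have hsubnone := invalid_sub pools s hvfalse
      cases hd : s.reverse.dropWhile (fun c => c == 2) with
      | nil =>
        rw [if_pos (by simp [drop2, hd])]
        have hafter : afterR pools s.reverse = [] := by
          rw [← afterR_dropWhile pools s.reverse
            (fun c hc => hwf.2 c (List.mem_reverse.mp hc)), hd]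
          rfl
        rw [remC, List.find?_append, hsubnone, hafter]
        rfl
      | cons c rt =>
        have hne : (drop2 s).isEmpty = false := by simp [drop2, hd]
        rw [if_neg (by simp [hne])]
        have hinc : incLast (drop2 s) = rt.reverse ++ [c + 1] := by
          simp [incLast, drop2, hd]
        obtain ⟨hrt, hc01, hlen⟩ := wf_entries_drop s c rt hwf.2 hd
        have hwf' : wfS pools (rt.reverse ++ [c + 1]) := by
          constructor
          · have : rt.length + 1 ≤ pools.length := le_trans hlen hwf.1
            simpa using this
          · intro x hx
            rcases List.mem_append.mp hx with h | h
            · exact hrt x (List.mem_reverse.mp h)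
            · have : x = c + 1 := by simpa using h
              subst this
              rcases hc01 with rfl | rfl
              · right; left; rfl
              · right; right; rfl
        -- decompose s as (rt.reverse ++ [c]) ++ trailing-2s
        have hsplit : s = (rt.reverse ++ [c]) ++ (s.reverse.takeWhile (fun c => c == 2)).reverse := by
          have h2 : s.reverse.takeWhile (fun c => c == 2) ++ (c :: rt) = s.reverse := by
            rw [← hd]; exact List.takeWhile_append_dropWhile
          have h3 : (s.reverse.takeWhile (fun c => c == 2) ++ (c :: rt)).reverse = s := by
            rw [h2, List.reverse_reverse]
          conv_lhs => rw [← h3]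
          simp [List.reverse_append, List.append_assoc]
        have htw : ∀ x ∈ (s.reverse.takeWhile (fun c => (c : Int) == 2)).reverse, x = 2 := by
          intro x hx
          have := List.mem_takeWhile_imp (List.mem_reverse.mp hx)
          simpa using this
        have hmu' : muS pools.length (rt.reverse ++ [c + 1]) < fuel := by
          have := mu_advance pools.length rt.reverse c
            (s.reverse.takeWhile (fun c => c == 2)).reverse htw hc01
          rw [← hsplit] at this
          omega
        rw [hinc, ih (rt.reverse ++ [c + 1]) hwf' hmu']
        have hafter : afterR pools s.reverse = remC pools (rt.reverse ++ [c + 1]) := by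
          rw [← afterR_dropWhile pools s.reverse
            (fun x hx => hwf.2 x (List.mem_reverse.mp hx)), hd,
            after_advance pools rt c hc01]
        conv_rhs => rw [remC, List.find?_append, hsubnone, Option.none_or, hafter]

theorem remC_nil (pools : List (List (Int × Int × Int))) : remC pools [] = combosB pools := by
  simp [remC, subC, afterR, chosenB]

-- ===== VERDICT (by name: the statement is the Claim_ definition above) =====
theorem solve_spec : Claim_equal_solve := by
  intro slices _
  unfold Spec_solve solve solve_alt
  rw [bt_char, ← validB_eq_extOk]
  have hp : ∀ p ∈ slices.map rotations, p.length = 3 := by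
    intro p hp
    rcases List.mem_map.mp hp with ⟨t, _, rfl⟩
    rfl
  have hlen : (slices.map rotations).length = slices.length := by simp
  have := loopB_char (slices.map rotations) hp (fuelB slices.length + 1) []
    ⟨by simp, by simp⟩
    (by simp [muS, SS, hlen])
  rw [hlen] at this
  rw [this, remC_nil]
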